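-- pv_equiv track=rewrite | github.com/marjjo/image_api | app.py | parse_multi_param
-- ===== SOURCE A (Python) =====
-- from typing import Dict, List
--
-- def parse_multi_param(values: List[str]) -> List[str]:
--     """
--     Accept repeated params (?tag=a&tag=b) and comma lists (?tag=a,b).
--     Returns a flattened list of non-empty strings.
--     """
--     out = []
--     for v in values:
--         if v is None:
--             continue
--         parts = [p.strip() for p in v.split(",")]
--         out.extend([p for p in parts if p])
--     return out
-- ===== SOURCE B (Python) =====
-- def parse_multi_param(values):
--     """
--     Accept repeated params (?tag=a&tag=b) and comma lists (?tag=a,b).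
--     Returns a flattened list of non-empty strings.
--     Single-pass character automaton: no split()/strip() calls; a comma flushes
--     the current token, leading/trailing whitespace never enters a token.
--     """
--     out = []
--     for v in values:
--         if v is None:
--             continue
--         token = ""    # current token, leading whitespace already skipped
--         pending = ""  # whitespace seen after token chars; dropped if trailing
--         for ch in v:
--             if ch == ',':
--                 if token:
--                     out.append(token)
--                 token = ""
--                 pending = ""
--             elif ch.isspace():
--                 if token:
--                     pending += ch
--             else:
--                 token += pending + ch
--                 pending = ""
--         if token:
--             out.append(token)
--     return out
-- ===== Notes on version B (the rewrite author's own statement) =====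
-- stated objective: alternative
-- what changed: A splits each value on ',' and strips each fragment with library calls; B is a single-pass character automaton that never calls split or strip: it scans each value char by char, buffering interior whitespace and flushing the current token on a comma.
import Mathlib
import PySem

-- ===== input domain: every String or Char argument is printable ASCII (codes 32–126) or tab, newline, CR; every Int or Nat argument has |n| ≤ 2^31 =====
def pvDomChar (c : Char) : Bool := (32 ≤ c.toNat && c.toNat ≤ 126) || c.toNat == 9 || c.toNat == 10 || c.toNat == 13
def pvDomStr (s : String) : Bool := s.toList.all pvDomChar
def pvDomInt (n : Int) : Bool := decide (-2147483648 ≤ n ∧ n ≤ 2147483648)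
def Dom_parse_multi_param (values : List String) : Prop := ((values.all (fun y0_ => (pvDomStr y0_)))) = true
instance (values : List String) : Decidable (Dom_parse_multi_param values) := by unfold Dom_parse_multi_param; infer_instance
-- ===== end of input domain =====

-- B replaces A's per-value split/strip with a single-pass character automaton
-- (comma flushes the token, whitespace is buffered and dropped if trailing): alternative.

-- ===== PORT A =====
def parse_multi_param (values : List String) : List String :=
  values.foldl (fun out v =>
    let parts := (PySem.Chars.splitOn v.toList [',']).map PySem.Chars.strip
    out ++ (parts.filter (fun p => !p.isEmpty)).map String.ofList) []

-- ===== PORT B =====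
-- inner character loop of Source B: state (token, pending), flushing into out
def scanVal (cs token pending : List Char) (out : List String) : List String :=
  match cs with
  | [] => if token.isEmpty then out else out ++ [String.ofList token]
  | c :: rest =>
    if c = ',' then
      scanVal rest [] [] (if token.isEmpty then out else out ++ [String.ofList token])
    else if PySem.Chars.isspace c then
      scanVal rest token (if token.isEmpty then pending else pending ++ [c]) out
    else
      scanVal rest (token ++ pending ++ [c]) [] out

def parse_multi_param_alt (values : List String) : List String :=
  values.foldl (fun out v => scanVal v.toList [] [] out) []

-- ===== PRECONDITION & SPEC =====
def Spec_parse_multi_param (values : List String) (out : List String) : Prop := out = parse_multi_param_alt values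
instance (values : List String) (out : List String) : Decidable (Spec_parse_multi_param values out) := by unfold Spec_parse_multi_param; infer_instance

-- ===== CLAIM (what is proved, stated in full; the proofs are below) =====
def Claim_equal_parse_multi_param : Prop := ∀ (values : List String), Dom_parse_multi_param values → Spec_parse_multi_param values (parse_multi_param values)

-- ===== LEMMAS AND PROOFS =====

-- reference comma-splitter used only by the proofs
def splitComma : List Char → List (List Char)
  | [] => [[]]
  | c :: rest =>
      if c = ',' then [] :: splitComma rest
      else
        match splitComma rest with
        | r :: rs => (c :: r) :: rs
        | [] => [[c]]

theorem splitComma_ne_nil (l : List Char) : splitComma l ≠ [] := by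
  cases l with
  | nil => simp [splitComma]
  | cons c rest =>
    simp only [splitComma]
    split_ifs
    · simp
    · cases h : splitComma rest <;> simp

theorem splitOn_go_eq (fuel : Nat) (l cur : List Char) (acc : List (List Char))
    (h : l.length < fuel) :
    PySem.Chars.splitOn.go [','] fuel l cur acc =
      acc.reverse ++
        (match splitComma l with
         | r :: rs => (cur.reverse ++ r) :: rs
         | [] => [cur.reverse]) := by
  induction fuel generalizing l cur acc with
  | zero => omega
  | succ fuel ih =>
    cases l with
    | nil =>
      simp [PySem.Chars.splitOn.go, splitComma]
    | cons c rest =>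
      by_cases hc : c = ','
      · subst hc
        rw [PySem.Chars.splitOn.go]
        have hpre : List.isPrefixOf [','] (',' :: rest) = true := by
          simp [List.isPrefixOf]
        rw [hpre, if_pos rfl]
        have hdrop : List.drop [','].length (',' :: rest) = rest := rfl
        rw [hdrop, ih rest [] ((cur.reverse) :: acc) (by simpa using Nat.lt_of_succ_lt_succ h)]
        have hne := splitComma_ne_nil rest
        cases hs : splitComma rest with
        | nil => exact absurd hs hne
        | cons r rs => simp [splitComma, hs]
      · rw [PySem.Chars.splitOn.go]
        have hpre : List.isPrefixOf [','] (c :: rest) = false := by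
          simp [List.isPrefixOf, Ne.symm hc]
        rw [hpre]
        simp only [Bool.false_eq_true, if_false]
        rw [ih rest (c :: cur) acc (by simpa using Nat.lt_of_succ_lt_succ h)]
        have hne := splitComma_ne_nil rest
        cases hs : splitComma rest with
        | nil => exact absurd hs hne
        | cons r rs => simp [splitComma, hc, hs]

theorem splitOn_eq_splitComma (l : List Char) :
    PySem.Chars.splitOn l [','] = splitComma l := by
  unfold PySem.Chars.splitOn
  rw [splitOn_go_eq _ _ _ _ (by omega)]
  have hne := splitComma_ne_nil l
  cases hs : splitComma l with
  | nil => exact absurd hs hne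
  | cons r rs => simp

-- what A contributes for each single value, via the reference splitter
def stripPieces (rs : List (List Char)) : List String :=
  ((rs.map PySem.Chars.strip).filter (fun p => !p.isEmpty)).map String.ofList

def pieces (v : String) : List String := stripPieces (splitComma v.toList)

theorem foldl_acc (f : String → List String) (values : List String) (init : List String) :
    List.foldl (fun out v => out ++ f v) init values = init ++ values.flatMap f := by
  induction values generalizing init with
  | nil => simp
  | cons v rest ih => simp [ih]

theorem parse_multi_param_eq_flatMap (values : List String) :
    parse_multi_param values = values.flatMap pieces := by
  unfold parse_multi_param
  have : ∀ out v,
      (fun out v =>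
        let parts := (PySem.Chars.splitOn v.toList [',']).map PySem.Chars.strip
        out ++ (parts.filter (fun p => !p.isEmpty)).map String.ofList) out v
      = out ++ pieces v := by
    intro out v
    simp [pieces, stripPieces, splitOn_eq_splitComma]
  simp only [this]
  exact foldl_acc pieces values []

-- the token B will emit for the current fragment, given remaining chars r
def emit (token pending r : List Char) : List Char :=
  if token = [] then PySem.Chars.strip r
  else PySem.Chars.rstrip (token ++ pending ++ r)

def optPiece (t : List Char) : List String := if t = [] then [] else [String.ofList t]

theorem rstrip_append_ws (t p : List Char) (hp : ∀ c ∈ p, PySem.Chars.isspace c = true)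
    (hl : ∀ h : t ≠ [], PySem.Chars.isspace (t.getLast h) = false) :
    PySem.Chars.rstrip (t ++ p) = t := by
  unfold PySem.Chars.rstrip
  rw [List.reverse_append]
  have hdp : p.reverse.dropWhile PySem.Chars.isspace = [] := by
    rw [List.dropWhile_eq_nil_iff]
    intro x hx
    exact hp _ (List.mem_reverse.mp hx)
  rw [List.dropWhile_append, hdp]
  simp only [List.isEmpty_nil, if_true]
  by_cases ht : t = []
  · simp [ht]
  · have hrev : t.reverse = t.getLast ht :: (t.dropLast).reverse := by
      conv_lhs => rw [← List.dropLast_append_getLast ht]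
      simp
    rw [hrev, List.dropWhile_cons, hl ht]
    simp [← hrev]

theorem strip_cons_ws (c : Char) (r : List Char) (hc : PySem.Chars.isspace c = true) :
    PySem.Chars.strip (c :: r) = PySem.Chars.strip r := by
  simp [PySem.Chars.strip, PySem.Chars.lstrip, hc]

theorem strip_cons_nonws (c : Char) (r : List Char) (hc : PySem.Chars.isspace c = false) :
    PySem.Chars.strip (c :: r) = PySem.Chars.rstrip (c :: r) := by
  simp [PySem.Chars.strip, PySem.Chars.lstrip, hc]

theorem emit_nil_eq_token (token pending : List Char)
    (hp : ∀ c ∈ pending, PySem.Chars.isspace c = true)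
    (hl : ∀ h : token ≠ [], PySem.Chars.isspace (token.getLast h) = false) :
    emit token pending [] = token := by
  by_cases hne : token = []
  · simp [emit, hne, PySem.Chars.strip, PySem.Chars.lstrip, PySem.Chars.rstrip]
  · simp only [emit, if_neg hne, List.append_nil]
    exact rstrip_append_ws token pending hp hl

theorem flush_eq_optPiece (token pending : List Char) (out : List String)
    (hp : ∀ c ∈ pending, PySem.Chars.isspace c = true)
    (hl : ∀ h : token ≠ [], PySem.Chars.isspace (token.getLast h) = false) :
    (if token.isEmpty then out else out ++ [String.ofList token])
      = out ++ optPiece (emit token pending []) := by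
  rw [emit_nil_eq_token token pending hp hl]
  by_cases hne : token = []
  · simp [hne, optPiece]
  · simp [optPiece, hne, List.isEmpty_iff]

theorem optPiece_strip_cons (r : List Char) (rs : List (List Char)) :
    optPiece (PySem.Chars.strip r) ++ stripPieces rs = stripPieces (r :: rs) := by
  by_cases h : PySem.Chars.strip r = []
  · simp [optPiece, stripPieces, h]
  · simp [optPiece, stripPieces, h]

theorem scanVal_eq (cs : List Char) :
    ∀ (token pending : List Char) (out : List String) (r : List Char) (rs : List (List Char)),
    splitComma cs = r :: rs →
    (∀ c ∈ pending, PySem.Chars.isspace c = true) →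
    (token = [] → pending = []) →
    (∀ h : token ≠ [], PySem.Chars.isspace (token.getLast h) = false) →
    scanVal cs token pending out = out ++ optPiece (emit token pending r) ++ stripPieces rs := by
  induction cs with
  | nil =>
    intro token pending out r rs hs hp h0 hl
    have hs2 : ([[]] : List (List Char)) = r :: rs := by simpa [splitComma] using hs
    injection hs2 with hr hrs
    subst hr; subst hrs
    show (if token.isEmpty then out else out ++ [String.ofList token]) = _
    rw [flush_eq_optPiece token pending out hp hl]
    simp [stripPieces]
  | cons c rest ih =>
    intro token pending out r rs hs hp h0 hl
    have hne := splitComma_ne_nil rest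
    obtain ⟨r', rs', hs'⟩ : ∃ r' rs', splitComma rest = r' :: rs' := by
      cases h : splitComma rest with
      | nil => exact absurd h hne
      | cons a b => exact ⟨a, b, rfl⟩
    by_cases hc : c = ','
    · subst hc
      have hs2 : ([] : List Char) :: splitComma rest = r :: rs := by
        simpa [splitComma] using hs
      rw [hs'] at hs2
      injection hs2 with hr hrs
      subst hr; subst hrs
      have goal1 : scanVal (',' :: rest) token pending out
          = scanVal rest [] [] (if token.isEmpty then out else out ++ [String.ofList token]) := by
        simp [scanVal]
      rw [goal1, ih [] [] _ r' rs' hs' (by simp) (fun _ => rfl) (by simp),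
        flush_eq_optPiece token pending out hp hl]
      have he : emit [] [] r' = PySem.Chars.strip r' := by simp [emit]
      rw [he, List.append_assoc, optPiece_strip_cons]
    · have hs2 : (c :: r') :: rs' = r :: rs := by
        simpa [splitComma, hc, hs'] using hs
      injection hs2 with hr hrs
      subst hr; subst hrs
      by_cases hw : PySem.Chars.isspace c = true
      · -- whitespace char
        have goal1 : scanVal (c :: rest) token pending out
            = scanVal rest token (if token.isEmpty then pending else pending ++ [c]) out := by
          simp [scanVal, hc, hw]
        rw [goal1]
        by_cases hne' : token = []
        · have h0' := h0 hne'
          subst hne'; subst h0'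
          simp only [List.isEmpty_nil, if_true]
          rw [ih [] [] out r' rs' hs' (by simp) (fun _ => rfl) (by simp)]
          have : emit [] [] (c :: r') = emit [] [] r' := by
            simp [emit, strip_cons_ws c r' hw]
          rw [this]
        · have hie : token.isEmpty = false := by simp [hne']
          rw [hie]
          simp only [Bool.false_eq_true, if_false]
          rw [ih token (pending ++ [c]) out r' rs' hs'
            (by intro x hx
                rcases List.mem_append.mp hx with h | h
                · exact hp _ h
                · simp at h; subst h; exact hw)
            (fun h => absurd h hne') hl]
          have : emit token (pending ++ [c]) r' = emit token pending (c :: r') := by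
            simp only [emit, if_neg hne']
            congr 1
            simp
          rw [this]
      · -- ordinary char
        have hwf : PySem.Chars.isspace c = false := by
          cases h : PySem.Chars.isspace c
          · rfl
          · exact absurd h hw
        have goal1 : scanVal (c :: rest) token pending out
            = scanVal rest (token ++ pending ++ [c]) [] out := by
          simp [scanVal, hc, hwf]
        have hne'' : token ++ pending ++ [c] ≠ [] := by simp
        rw [goal1, ih (token ++ pending ++ [c]) [] out r' rs' hs' (by simp)
          (fun h => absurd h hne'')
          (by intro h; simp; exact hwf)]
        have : emit (token ++ pending ++ [c]) [] r' = emit token pending (c :: r') := by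
          by_cases hne' : token = []
          · have h0' := h0 hne'
            subst hne'; subst h0'
            simp [emit, strip_cons_nonws c r' hwf]
          · simp only [emit, if_neg hne'', if_neg hne']
            congr 1
            simp
        rw [this]

theorem scanVal_flush (v : String) (out : List String) :
    scanVal v.toList [] [] out = out ++ pieces v := by
  have hne := splitComma_ne_nil v.toList
  obtain ⟨r, rs, hs⟩ : ∃ r rs, splitComma v.toList = r :: rs := by
    cases h : splitComma v.toList with
    | nil => exact absurd h hne
    | cons a b => exact ⟨a, b, rfl⟩
  rw [scanVal_eq v.toList [] [] out r rs hs (by simp) (fun _ => rfl) (by simp)]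
  have he : emit [] [] r = PySem.Chars.strip r := by simp [emit]
  rw [he, List.append_assoc, optPiece_strip_cons]
  simp [pieces, hs]

theorem parse_multi_param_alt_eq (values : List String) :
    parse_multi_param_alt values = values.flatMap pieces := by
  unfold parse_multi_param_alt
  simp only [scanVal_flush]
  exact foldl_acc pieces values []

-- ===== VERDICT (by name: the statement is the Claim_ definition above) =====
theorem parse_multi_param_spec : Claim_equal_parse_multi_param := by
  intro values _
  unfold Spec_parse_multi_param
  rw [parse_multi_param_eq_flatMap, parse_multi_param_alt_eq]
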